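-- pv_equiv track=rewrite | github.com/neostrange/textgraphx | src/textgraphx/tests/test_cypher_safety_pass.py | _extract_cypher_strings
-- ===== SOURCE A (Python) =====
-- def _extract_cypher_strings(source: str) -> list[tuple[int, str]]:
--     """Extract triple-quoted Cypher query strings with their line numbers."""
--     queries = []
--     lines = source.splitlines(keepends=True)
--     i = 0
--     while i < len(lines):
--         line = lines[i]
--         # Look for """ pattern
--         if '"""' in line:
--             start_line = i + 1
--             # Find closing """
--             rest = line.split('"""', 1)[1]  # skip opening """
--             if '"""' in rest:
--                 # Same-line triple-quoted string (rare for Cypher)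
--                 query_text = rest.split('"""')[0]
--                 queries.append((start_line, query_text))
--                 i += 1
--             else:
--                 # Multi-line string
--                 query_text = rest
--                 i += 1
--                 while i < len(lines):
--                     if '"""' in lines[i]:
--                         query_text += lines[i].split('"""')[0]
--                         queries.append((start_line, query_text))
--                         break
--                     else:
--                         query_text += lines[i]
--                     i += 1
--                 i += 1
--         else:
--             i += 1
--     return queries
-- ===== SOURCE B (Python) =====
-- def _extract_cypher_strings(source: str) -> list[tuple[int, str]]:
--     """Extract triple-quoted Cypher query strings with their line numbers."""
--     lines = source.splitlines(keepends=True)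
--     # Stage 1: indices of all lines containing a triple quote.
--     marks = [i for i, line in enumerate(lines) if '"""' in line]
--     # Stage 2: pair the markers; in-between lines are joined wholesale by slicing.
--     queries = []
--     while marks:
--         j, marks = marks[0], marks[1:]
--         rest = lines[j].split('"""', 1)[1]
--         if '"""' in rest:
--             queries.append((j + 1, rest.split('"""')[0]))
--         elif marks:
--             k, marks = marks[0], marks[1:]
--             queries.append((j + 1, rest + ''.join(lines[j + 1:k]) + lines[k].split('"""')[0]))
--     return queries
-- ===== Notes on version B (the rewrite author's own statement) =====
-- stated objective: alternative
-- what changed: B is a staged algorithm: it first builds the list of indices of lines containing a triple quote, then walks only that marker list, pairing an opening marker with the next marker and joining the in-between lines wholesale via a list slice, instead of A's stateful nested index-sharing while loops that scan every line and accumulate the query text line by line.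
import Mathlib
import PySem

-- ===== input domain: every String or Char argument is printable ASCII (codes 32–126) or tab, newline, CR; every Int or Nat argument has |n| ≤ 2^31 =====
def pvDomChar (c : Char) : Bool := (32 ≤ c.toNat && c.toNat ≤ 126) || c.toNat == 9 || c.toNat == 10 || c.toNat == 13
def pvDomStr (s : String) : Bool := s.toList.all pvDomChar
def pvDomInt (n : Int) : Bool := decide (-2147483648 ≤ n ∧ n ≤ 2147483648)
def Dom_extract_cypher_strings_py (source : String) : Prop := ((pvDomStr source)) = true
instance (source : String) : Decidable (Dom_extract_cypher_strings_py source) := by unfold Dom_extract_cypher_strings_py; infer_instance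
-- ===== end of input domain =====

-- B replaces A's stateful nested while loops by two stages: collect the indices of
-- marker lines (those containing a triple quote), then pair those markers, joining
-- the in-between lines wholesale with a slice; objective: alternative.

-- shared helper (PySem has no keepends variant): str.splitlines(keepends=True),
-- exact on the domain's characters (tab, '\n', '\r', '\r\n', printable ASCII).
def pvSplitlinesKeep (acc : List Char) : List Char → List (List Char)
  | [] => if acc = [] then [] else [acc]
  | '\r' :: '\n' :: rest => (acc ++ ['\r', '\n']) :: pvSplitlinesKeep [] rest
  | '\r' :: rest => (acc ++ ['\r']) :: pvSplitlinesKeep [] rest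
  | '\n' :: rest => (acc ++ ['\n']) :: pvSplitlinesKeep [] rest
  | c :: rest => pvSplitlinesKeep (acc ++ [c]) rest
termination_by l => l.length

def pvQ3 : List Char := ['"', '"', '"']

-- ===== PORT A =====
mutual
-- outer 'while i < len(lines)' of A
def pvLoopA : List (List Char) → Int → List (Int × String)
  | [], _ => []
  | line :: ls, i =>
    if PySem.Chars.isIn pvQ3 line then
      let restp := PySem.List.pyGetD (PySem.Chars.splitOnMax line pvQ3 1) 1 []
      if PySem.Chars.isIn pvQ3 restp then
        ((i + 1, String.ofList (PySem.List.pyGetD (PySem.Chars.splitOn restp pvQ3) 0 []))) :: pvLoopA ls (i + 1)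
      else
        pvInnerA ls (i + 1) (i + 1) restp
    else
      pvLoopA ls (i + 1)
  termination_by ls _ => ls.length
-- inner 'while i < len(lines)' of A, scanning for the closing quote
def pvInnerA : List (List Char) → Int → Int → List Char → List (Int × String)
  | [], _, _, _ => []
  | l :: ls, i, start, acc =>
    if PySem.Chars.isIn pvQ3 l then
      ((start, String.ofList (acc ++ PySem.List.pyGetD (PySem.Chars.splitOn l pvQ3) 0 []))) :: pvLoopA ls (i + 1)
    else
      pvInnerA ls (i + 1) start (acc ++ l)
  termination_by ls _ _ _ => ls.length
end

def extract_cypher_strings_py (source : String) : List (Int × String) :=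
  pvLoopA (pvSplitlinesKeep [] source.toList) 0

-- ===== PORT B =====
-- stage 1: '[i for i, line in enumerate(lines) if \'"""\' in line]'
def pvMarksFrom (i : Nat) : List (List Char) → List Nat
  | [] => []
  | l :: ls => if PySem.Chars.isIn pvQ3 l then i :: pvMarksFrom (i + 1) ls else pvMarksFrom (i + 1) ls

-- stage 2: 'while marks:' popping one marker (same-line string) or two (opening/closing pair);
-- the marker indices are valid nonnegative indices into lines, so lines[j] is lines.getD j []
-- and the slice lines[j+1:k] (0 ≤ j+1 ≤ k) is exactly take ∘ drop, ''.join is flatten.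
def pvPairB (lines : List (List Char)) : List Nat → List (Int × String)
  | [] => []
  | j :: ms =>
    let rest := PySem.List.pyGetD (PySem.Chars.splitOnMax (lines.getD j []) pvQ3 1) 1 []
    if PySem.Chars.isIn pvQ3 rest then
      (((j : Int) + 1, String.ofList (PySem.List.pyGetD (PySem.Chars.splitOn rest pvQ3) 0 []))) :: pvPairB lines ms
    else
      match ms with
      | [] => []
      | k :: ms' =>
        (((j : Int) + 1, String.ofList (rest ++ ((lines.drop (j + 1)).take (k - (j + 1))).flatten
            ++ PySem.List.pyGetD (PySem.Chars.splitOn (lines.getD k []) pvQ3) 0 []))) :: pvPairB lines ms'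

def extract_cypher_strings_py_alt (source : String) : List (Int × String) :=
  let lines := pvSplitlinesKeep [] source.toList
  pvPairB lines (pvMarksFrom 0 lines)

-- ===== PRECONDITION & SPEC =====
def Spec_extract_cypher_strings_py (source : String) (out : List (Int × String)) : Prop := out = extract_cypher_strings_py_alt source
instance (source : String) (out : List (Int × String)) : Decidable (Spec_extract_cypher_strings_py source out) := by unfold Spec_extract_cypher_strings_py; infer_instance

-- ===== CLAIM (what is proved, stated in full; the proofs are below) =====
def Claim_equal_extract_cypher_strings_py : Prop := ∀ (source : String), Dom_extract_cypher_strings_py source → Spec_extract_cypher_strings_py source (extract_cypher_strings_py source)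

-- ===== LEMMAS AND PROOFS =====
-- one-step unfolding of pvPairB on a cons marker list
theorem pvPairB_cons (lines : List (List Char)) (j : Nat) (ms : List Nat) :
    pvPairB lines (j :: ms) =
      (if PySem.Chars.isIn pvQ3 (PySem.List.pyGetD (PySem.Chars.splitOnMax (lines.getD j []) pvQ3 1) 1 []) = true then
        (((j : Int) + 1, String.ofList (PySem.List.pyGetD (PySem.Chars.splitOn (PySem.List.pyGetD (PySem.Chars.splitOnMax (lines.getD j []) pvQ3 1) 1 []) pvQ3) 0 []))) :: pvPairB lines ms
      else
        match ms with
        | [] => []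
        | k :: ms' =>
          (((j : Int) + 1, String.ofList (PySem.List.pyGetD (PySem.Chars.splitOnMax (lines.getD j []) pvQ3 1) 1 [] ++ ((lines.drop (j + 1)).take (k - (j + 1))).flatten
              ++ PySem.List.pyGetD (PySem.Chars.splitOn (lines.getD k []) pvQ3) 0 []))) :: pvPairB lines ms') := by
  rw [pvPairB.eq_def]

-- every marker index is at least the starting counter
theorem pvMarksFrom_ge (ls : List (List Char)) : ∀ (i k : Nat), k ∈ pvMarksFrom i ls → i ≤ k := by
  induction ls with
  | nil => intro i k h; simp [pvMarksFrom] at h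
  | cons l ls ih =>
    intro i k h
    by_cases hl : PySem.Chars.isIn pvQ3 l = true
    · simp only [pvMarksFrom, hl, if_pos, List.mem_cons] at h
      rcases h with h | h
      · omega
      · have := ih (i + 1) k h; omega
    · simp only [pvMarksFrom, hl] at h
      have := ih (i + 1) k h; omega

-- A's two loops, run on the suffix of lines starting at index n, compute what B computes
-- from the marker indices of that suffix; the inner loop's accumulator corresponds to
-- the joined slice up to the next marker.
theorem pv_eq (ls : List (List Char)) : ∀ (lines : List (List Char)) (n : Nat), lines.drop n = ls →
    (pvLoopA ls (n : Int) = pvPairB lines (pvMarksFrom n ls)) ∧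
    (∀ (start : Int) (acc : List Char), pvInnerA ls (n : Int) start acc =
      match pvMarksFrom n ls with
      | [] => []
      | k :: ms =>
        ((start, String.ofList (acc ++ ((lines.drop n).take (k - n)).flatten
            ++ PySem.List.pyGetD (PySem.Chars.splitOn (lines.getD k []) pvQ3) 0 []))) :: pvPairB lines ms) := by
  induction ls with
  | nil =>
    intro lines n _
    exact ⟨by simp [pvLoopA, pvMarksFrom, pvPairB], fun _ _ => by simp [pvInnerA, pvMarksFrom]⟩
  | cons l ls ih =>
    intro lines n hdrop
    have hdrop' : lines.drop (n + 1) = ls := by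
      have : lines.drop (n + 1) = (lines.drop n).drop 1 := by
        rw [List.drop_drop]
      rw [this, hdrop]; rfl
    have hget : lines.getD n [] = l := by
      have h0 : lines[n]? = some l := by
        have h := congrArg (fun t : List (List Char) => t[0]?) hdrop
        simpa [List.getElem?_drop] using h
      simp [List.getD, h0]
    have ihA := (ih lines (n + 1) hdrop').1
    have ihI := (ih lines (n + 1) hdrop').2
    have hcast : ((n : Int) + 1) = ((n + 1 : Nat) : Int) := by push_cast; ring
    constructor
    · by_cases hl : PySem.Chars.isIn pvQ3 l = true
      · rw [show pvMarksFrom n (l :: ls) = n :: pvMarksFrom (n + 1) ls by simp [pvMarksFrom, hl],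
            pvPairB_cons, hget]
        by_cases hr : PySem.Chars.isIn pvQ3 (PySem.List.pyGetD (PySem.Chars.splitOnMax l pvQ3 1) 1 []) = true
        · simp only [pvLoopA, hl, hr, if_pos, hcast, ihA]
        · simp only [pvLoopA, hl, hr, if_pos, Bool.false_eq_true, if_false]
          rw [hcast, ihI]
      · simp only [pvLoopA, hl, Bool.false_eq_true, if_false, pvMarksFrom, hcast, ihA]
    · intro start acc
      by_cases hl : PySem.Chars.isIn pvQ3 l = true
      · rw [show pvMarksFrom n (l :: ls) = n :: pvMarksFrom (n + 1) ls by simp [pvMarksFrom, hl]]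
        simp only [pvInnerA, hl, if_pos, hcast, ihA, hget, hdrop]
        simp
      · simp only [pvInnerA, hl, Bool.false_eq_true, if_false, pvMarksFrom, hcast]
        rw [ihI]
        cases hm : pvMarksFrom (n + 1) ls with
        | nil => rfl
        | cons k ms =>
          have hk : n + 1 ≤ k := pvMarksFrom_ge ls (n + 1) k (by rw [hm]; exact List.mem_cons_self ..)
          have htake : ((lines.drop n).take (k - n)).flatten
              = l ++ ((lines.drop (n + 1)).take (k - (n + 1))).flatten := by
            have hkn : k - n = (k - (n + 1)) + 1 := by omega
            rw [hdrop, hkn, List.take_succ_cons, List.flatten_cons, hdrop']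
          simp [htake, List.append_assoc]

-- ===== VERDICT (by name: the statement is the Claim_ definition above) =====
theorem extract_cypher_strings_py_spec : Claim_equal_extract_cypher_strings_py := by
  intro source _
  unfold Spec_extract_cypher_strings_py extract_cypher_strings_py extract_cypher_strings_py_alt
  exact (pv_eq _ _ 0 rfl).1
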